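-- pv_equiv track=rewrite | github.com/ReneGRomCodes/FCC_daily_coding_challenges | 08-25/28-08-25 Second Best.py | get_laptop_cost
-- ===== SOURCE A (Python) =====
-- def get_laptop_cost(laptops: list[int], budget: int) -> int:
--     laptops.remove(max(laptops))  # Remove most expensive Laptop first.
--     found_laptop = False
--
--     while not found_laptop:
--         if laptops:
--             if max(laptops) > budget:
--                 laptops.remove(max(laptops))
--                 continue
--             elif max(laptops) <= budget:
--                 found_laptop = max(laptops)
--
--         else:
--             return 0
--
--     return found_laptop
-- ===== SOURCE B (Python) =====
-- def get_laptop_cost(laptops: list[int], budget: int) -> int: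
--     # Single pass after one max computation; does not mutate the input
--     # (A mutates `laptops` in place; equivalence claimed is about the return value).
--     m = max(laptops)
--     skipped = False
--     best = None
--     for x in laptops:
--         if not skipped and x == m:
--             skipped = True
--         elif x <= budget and (best is None or x > best):
--             best = x
--     return 0 if best is None else best
-- ===== Notes on version B (the rewrite author's own statement) =====
-- stated objective: faster
-- what changed: Instead of repeatedly recomputing max() and removing elements from the list until the max fits the budget, B computes the max once and does a single pass that skips one max occurrence and tracks the largest element <= budget; B also does not mutate the input list.
import Mathlib
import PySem

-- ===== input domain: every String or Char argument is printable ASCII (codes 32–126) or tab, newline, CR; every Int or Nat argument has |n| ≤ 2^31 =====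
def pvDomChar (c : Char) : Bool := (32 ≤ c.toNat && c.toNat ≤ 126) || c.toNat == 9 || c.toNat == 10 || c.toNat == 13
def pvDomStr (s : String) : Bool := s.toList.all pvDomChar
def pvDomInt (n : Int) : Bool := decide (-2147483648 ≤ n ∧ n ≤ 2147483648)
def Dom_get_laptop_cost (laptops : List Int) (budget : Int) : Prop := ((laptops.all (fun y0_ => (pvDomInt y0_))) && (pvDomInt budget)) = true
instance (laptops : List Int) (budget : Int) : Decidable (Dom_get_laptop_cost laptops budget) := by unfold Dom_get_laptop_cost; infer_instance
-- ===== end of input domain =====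

-- B replaces A's repeated max()+remove() scans by one max computation and one pass (asymptotically
-- faster); A mutates `laptops` in place, B does not: the equivalence proved is about the return value.


-- ===== PORT A =====
-- The while-loop of A: while the list's max exceeds budget, remove it (Python laptops.remove(max(laptops))
-- removes the first occurrence = List.erase); when max(laptops) ≤ budget Python sets found_laptop to it and
-- exits the loop if it is truthy — if that max is 0 Python loops forever, which Pre_ excludes, so the port
-- returns m in that branch.  max(xs) on nonempty x :: t is the running max t.foldl max x.
def get_laptop_cost_loopA (ls : List Int) (budget : Int) : Int :=
  match hls : ls with
  | [] => 0
  | x :: t =>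
      let m := t.foldl max x
      if m > budget then get_laptop_cost_loopA (ls.erase m) budget
      else m
termination_by ls.length
decreasing_by
  have hmem : t.foldl max x ∈ x :: t := by
    rcases PySem.List.foldl_max_mem t x with h | h
    · rw [h]; exact List.mem_cons_self
    · exact List.mem_cons_of_mem x h
  have := List.length_erase_of_mem hmem
  subst hls
  simp_all [List.length_cons]

def get_laptop_cost (laptops : List Int) (budget : Int) : Int :=
  match laptops with
  | [] => 0  -- Python raises ValueError on max([]); excluded by Pre_
  | x :: t => get_laptop_cost_loopA (laptops.erase (t.foldl max x)) budget

-- ===== PORT B =====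
-- Source B's loop body once the max-skip branch is not taken: best := x if x ≤ budget and x beats best.
def bstep (budget : Int) (o : Option Int) (y : Int) : Option Int :=
  match o with
  | none => if y ≤ budget then some y else o
  | some b => if y ≤ budget ∧ b < y then some y else o

-- Source B's full loop body, state = (skipped, best).
def sstep (m budget : Int) (st : Bool × Option Int) (y : Int) : Bool × Option Int :=
  if st.1 = false ∧ y = m then (true, st.2)
  else (st.1, bstep budget st.2 y)

def get_laptop_cost_alt (laptops : List Int) (budget : Int) : Int :=
  match laptops with
  | [] => 0  -- Python B raises ValueError on max([]); excluded by Pre_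
  | x :: t =>
      let m := t.foldl max x
      let st := laptops.foldl (sstep m budget) (false, none)
      match st.2 with
      | none => 0
      | some b => b

-- ===== PRECONDITION & SPEC =====
-- the list after Python's first laptops.remove(max(laptops)) (helper for Pre_ only)
def pvRest (laptops : List Int) : List Int :=
  match laptops with
  | [] => []
  | x :: t => laptops.erase (t.foldl max x)

-- Pre_ excludes only inputs on which Python A does NOT return: the empty list (max([]) raises
-- ValueError) and the inputs where, after removing one max, the largest remaining element ≤ budget
-- is exactly 0 — there A sets found_laptop = 0, which is falsy, and loops forever.
def Pre_get_laptop_cost (laptops : List Int) (budget : Int) : Prop :=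
  laptops ≠ [] ∧
  ¬ ((0 : Int) ∈ pvRest laptops ∧ 0 ≤ budget ∧ ∀ x ∈ pvRest laptops, x ≤ budget → x ≤ 0)
instance (laptops : List Int) (budget : Int) : Decidable (Pre_get_laptop_cost laptops budget) := by
  unfold Pre_get_laptop_cost; infer_instance

def pvWitness_get_laptop_cost : List Int × Int := ([5, 3, 7], 6)

def Spec_get_laptop_cost (laptops : List Int) (budget : Int) (out : Int) : Prop := out = get_laptop_cost_alt laptops budget
instance (laptops : List Int) (budget : Int) (out : Int) : Decidable (Spec_get_laptop_cost laptops budget out) := by unfold Spec_get_laptop_cost; infer_instance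

-- ===== CLAIM (what is proved, stated in full; the proofs are below) =====
def Claim_equal_get_laptop_cost : Prop := ∀ (laptops : List Int) (budget : Int), Dom_get_laptop_cost laptops budget → Pre_get_laptop_cost laptops budget → Spec_get_laptop_cost laptops budget (get_laptop_cost laptops budget)

-- ===== LEMMAS AND PROOFS =====

-- once something ≥ every later element is the current best, the fold keeps it
lemma foldl_bstep_const_max (budget m : Int) (t : List Int) (h : ∀ y ∈ t, y ≤ m) :
    t.foldl (bstep budget) (some m) = some m := by
  induction t with
  | nil => rfl
  | cons y t ih =>
      have hy : y ≤ m := h y List.mem_cons_self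
      have : bstep budget (some m) y = some m := by
        simp only [bstep]; rw [if_neg (by omega)]
      rw [List.foldl_cons, this]
      exact ih fun z hz => h z (List.mem_cons_of_mem _ hz)

-- if m is a member, m ≤ budget, and m dominates the list and the accumulator, the fold returns some m
lemma foldl_bstep_max (budget m : Int) (ls : List Int) (o : Option Int)
    (hmem : m ∈ ls) (hmb : m ≤ budget) (hmax : ∀ y ∈ ls, y ≤ m)
    (ho : ∀ b, o = some b → b ≤ m) :
    ls.foldl (bstep budget) o = some m := by
  induction ls generalizing o with
  | nil => cases hmem
  | cons y t ih =>
      rw [List.foldl_cons]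
      rcases List.mem_cons.mp hmem with rfl | hmt
      · have hstep : bstep budget o m = some m := by
          cases o with
          | none => simp [bstep, hmb]
          | some b =>
              have hb : b ≤ m := ho b rfl
              by_cases hbm : b < m
              · simp [bstep, hmb, hbm]
              · have hbe : b = m := by omega
                subst hbe; simp [bstep]
        rw [hstep]
        exact foldl_bstep_const_max budget m t fun z hz => hmax z (List.mem_cons_of_mem _ hz)
      · apply ih _ hmt (fun z hz => hmax z (List.mem_cons_of_mem _ hz))
        intro b hb
        cases o with
        | none =>
            simp only [bstep] at hb
            split at hb
            · cases hb; exact hmax _ List.mem_cons_self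
            · cases hb
        | some c =>
            simp only [bstep] at hb
            split at hb
            · cases hb; exact hmax _ List.mem_cons_self
            · cases hb; exact ho _ rfl

-- erasing an over-budget element does not change the fold (its step is the identity)
lemma foldl_bstep_erase (budget m : Int) (ls : List Int) (hgt : budget < m) :
    ∀ o : Option Int, (ls.erase m).foldl (bstep budget) o = ls.foldl (bstep budget) o := by
  induction ls with
  | nil => intro o; rfl
  | cons y t ih =>
      intro o
      by_cases hy : y = m
      · subst hy
        have hstep : bstep budget o y = o := by
          cases o <;> simp only [bstep] <;> rw [if_neg (by omega)]
        simp [List.erase_cons_head, List.foldl_cons, hstep]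
      · rw [List.erase_cons_tail (by simpa using hy), List.foldl_cons, List.foldl_cons, ih]

-- A's while-loop computes the best element ≤ budget (as the fold), default 0
lemma loopA_eq_fold (budget : Int) :
    ∀ n (ls : List Int), ls.length ≤ n →
      get_laptop_cost_loopA ls budget = (ls.foldl (bstep budget) none).getD 0 := by
  intro n
  induction n with
  | zero =>
      intro ls hls
      have : ls = [] := List.eq_nil_of_length_eq_zero (Nat.le_zero.mp hls)
      subst this
      rw [get_laptop_cost_loopA.eq_def]
      rfl
  | succ n ih =>
      intro ls hls
      match ls with
      | [] => rw [get_laptop_cost_loopA.eq_def]; rfl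
      | x :: t =>
          rw [get_laptop_cost_loopA.eq_def]
          simp only []
          set m := t.foldl max x with hm
          have hmem : m ∈ x :: t := by
            rcases PySem.List.foldl_max_mem t x with h | h
            · exact h ▸ List.mem_cons_self
            · exact List.mem_cons_of_mem _ h
          have hmax : ∀ y ∈ x :: t, y ≤ m := by
            intro y hy
            rcases List.mem_cons.mp hy with rfl | hyt
            · exact (PySem.List.le_foldl_max t y).1
            · exact (PySem.List.le_foldl_max t x).2 y hyt
          by_cases hgt : m > budget
          · have hlen : ((x :: t).erase m).length ≤ n := by
              have := List.length_erase_of_mem hmem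
              simp only [List.length_cons] at *
              omega
            rw [if_pos hgt, ih _ hlen, foldl_bstep_erase budget m _ hgt]
          · rw [if_neg hgt]
            have := foldl_bstep_max budget m (x :: t) none hmem (by omega) hmax (by simp)
            rw [this]; rfl

-- B's skip-flag fold after the flag is set is the plain best fold
lemma foldl_sstep_true (m budget : Int) (t : List Int) (o : Option Int) :
    t.foldl (sstep m budget) (true, o) = (true, t.foldl (bstep budget) o) := by
  induction t generalizing o with
  | nil => rfl
  | cons y t ih =>
      rw [List.foldl_cons, List.foldl_cons]
      have : sstep m budget (true, o) y = (true, bstep budget o y) := by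
        unfold sstep; simp
      rw [this, ih]

-- B's skip-flag fold from the unset flag skips exactly the first occurrence of m
lemma foldl_sstep_false (m budget : Int) (ls : List Int) (o : Option Int) (hm : m ∈ ls) :
    ls.foldl (sstep m budget) (false, o) = (true, (ls.erase m).foldl (bstep budget) o) := by
  induction ls generalizing o with
  | nil => cases hm
  | cons y t ih =>
      rw [List.foldl_cons]
      by_cases hy : y = m
      · subst hy
        have : sstep y budget (false, o) y = (true, o) := by unfold sstep; simp
        rw [this, List.erase_cons_head]
        exact foldl_sstep_true y budget t o
      · have hmt : m ∈ t := by
          rcases List.mem_cons.mp hm with h | h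
          · exact absurd h.symm hy
          · exact h
        have : sstep m budget (false, o) y = (false, bstep budget o y) := by
          unfold sstep; simp [hy]
        rw [this, List.erase_cons_tail (by simpa using hy), List.foldl_cons, ih _ hmt]

-- ===== VERDICT (by name: the statement is the Claim_ definition above) =====
theorem get_laptop_cost_spec : Claim_equal_get_laptop_cost := by
  intro laptops budget _ _
  unfold Spec_get_laptop_cost
  match laptops with
  | [] => rfl
  | x :: t =>
      show get_laptop_cost_loopA ((x :: t).erase (t.foldl max x)) budget = _
      simp only [get_laptop_cost_alt]
      set m := t.foldl max x with hm
      have hmem : m ∈ x :: t := by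
        rcases PySem.List.foldl_max_mem t x with h | h
        · exact h ▸ List.mem_cons_self
        · exact List.mem_cons_of_mem _ h
      rw [loopA_eq_fold budget ((x :: t).erase m).length _ le_rfl,
          foldl_sstep_false m budget (x :: t) none hmem]
      simp only []
      cases ((x :: t).erase m).foldl (bstep budget) none <;> rfl
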